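-- pv_equiv track=rewrite | github.com/xifengxixi/autoTest | ui_frame/utils/allure_analysis.py | get_allurePath
-- ===== SOURCE A (Python) =====
-- def get_allurePath(case):
--     """
--     获取allure路径
--     :param case:
--     :return:
--     """
--     labels = case.get('labels')
--     epic, feature, story = None, None, None
--     allure_dir = {}
--     for i in labels:
--         if i.get('name') == 'epic':
--             epic = i.get('value')
--         elif i.get('name') == 'feature':
--             feature = i.get('value')
--         elif i.get('name') == 'story':
--             story = i.get('value')
--         elif i.get('name') == 'subSuite':
--             allure_dir["subSuite"] = i.get('value')
--     allure_path = [epic, feature, story]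
--     return allure_path,allure_dir
-- ===== SOURCE B (Python) =====
-- def get_allurePath(case):
--     """
--     获取allure路径 (re-implementation: per-key backward search with early exit,
--     instead of one forward pass maintaining four accumulators)
--     :param case:
--     :return:
--     """
--     labels = case.get('labels')
--
--     def last_label(name):
--         # last occurrence wins, so scan from the back and stop at the first hit
--         for i in reversed(labels):
--             if i.get('name') == name:
--                 return True, i.get('value')
--         return False, None
--
--     allure_path = [last_label('epic')[1], last_label('feature')[1], last_label('story')[1]]
--     allure_dir = {}
--     found, value = last_label('subSuite')
--     if found:
--         allure_dir['subSuite'] = value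
--     return allure_path, allure_dir
-- ===== Notes on version B (the rewrite author's own statement) =====
-- stated objective: alternative
-- what changed: B replaces A's single forward pass that threads four accumulators through an if/elif chain by four independent backward searches with early exit (reversed(labels), stop at the first hit), exploiting that last-occurrence-wins makes the last match the answer; the subSuite key is added only if the backward search finds a match.
import Mathlib
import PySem

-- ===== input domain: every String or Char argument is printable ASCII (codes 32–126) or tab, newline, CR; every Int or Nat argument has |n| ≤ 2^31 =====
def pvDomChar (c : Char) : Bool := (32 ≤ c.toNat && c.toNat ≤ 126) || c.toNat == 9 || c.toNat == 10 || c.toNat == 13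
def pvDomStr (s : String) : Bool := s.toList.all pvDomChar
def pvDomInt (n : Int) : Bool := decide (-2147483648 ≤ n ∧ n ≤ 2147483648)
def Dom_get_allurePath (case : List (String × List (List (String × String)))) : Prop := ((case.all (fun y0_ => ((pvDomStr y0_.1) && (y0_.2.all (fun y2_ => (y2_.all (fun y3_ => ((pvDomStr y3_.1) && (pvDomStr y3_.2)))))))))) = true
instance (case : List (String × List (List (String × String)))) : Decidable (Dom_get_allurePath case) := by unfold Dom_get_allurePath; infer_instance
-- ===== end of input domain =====

-- B replaces A's single forward pass carrying four accumulators by four independent backward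
-- searches with early exit (last occurrence wins); objective: alternative decomposition, same O(n) cost.


-- ===== PORT A =====
-- A's loop state: (epic, feature, story, allure_dir); the if/elif chain in source order.
def get_allurePathStepA (st : Option String × Option String × Option String × PySem.Dict String String)
    (i : List (String × String)) :
    Option String × Option String × Option String × PySem.Dict String String :=
  if (PySem.Dict.mk i).get? "name" = some "epic" then ((PySem.Dict.mk i).get? "value", st.2.1, st.2.2.1, st.2.2.2)
  else if (PySem.Dict.mk i).get? "name" = some "feature" then (st.1, (PySem.Dict.mk i).get? "value", st.2.2.1, st.2.2.2)
  else if (PySem.Dict.mk i).get? "name" = some "story" then (st.1, st.2.1, (PySem.Dict.mk i).get? "value", st.2.2.2)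
  else if (PySem.Dict.mk i).get? "name" = some "subSuite" then
    match (PySem.Dict.mk i).get? "value" with
    | some v => (st.1, st.2.1, st.2.2.1, st.2.2.2.insert "subSuite" v)
    -- Python would store None in allure_dir here; not a value of the declared dict[str,str] type — excluded by Pre_.
    | none => st
  else st

def get_allurePath (case : List (String × List (List (String × String)))) : List (Option String) × (List (String × String)) :=
  match (PySem.Dict.mk case).get? "labels" with
  -- Python raises TypeError (iterating None) here — excluded by Pre_.
  | none => ([none, none, none], [])
  | some labels =>
    let s := labels.foldl get_allurePathStepA (none, none, none, PySem.Dict.empty)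
    ([s.1, s.2.1, s.2.2.1], s.2.2.2.items)

-- ===== PORT B =====
-- Source B's last_label: scan the reversed label list, early-return (True, value) at the first name match.
def lastLabel (rev : List (List (String × String))) (name : String) : Bool × Option String :=
  match rev with
  | [] => (false, none)
  | i :: rest =>
    if (PySem.Dict.mk i).get? "name" = some name then (true, (PySem.Dict.mk i).get? "value")
    else lastLabel rest name

def get_allurePath_alt (case : List (String × List (List (String × String)))) : List (Option String) × (List (String × String)) :=
  match (PySem.Dict.mk case).get? "labels" with
  -- Python raises TypeError (reversed(None)) here — excluded by Pre_.
  | none => ([none, none, none], [])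
  | some labels =>
    let rev := labels.reverse
    let allure_path := [(lastLabel rev "epic").2, (lastLabel rev "feature").2, (lastLabel rev "story").2]
    let found := (lastLabel rev "subSuite").1
    let value := (lastLabel rev "subSuite").2
    let allure_dir : List (String × String) :=
      if found then
        match value with
        | some v => [("subSuite", v)]
        -- Python stores None in allure_dir here; not a value of the declared dict[str,str] type — excluded by Pre_.
        | none => []
      else []
    (allure_path, allure_dir)

-- ===== PRECONDITION & SPEC =====
-- Pre_ excludes cases without a 'labels' key (A raises TypeError iterating None) and cases where a label whose
-- name is 'subSuite' has no 'value' key (A returns {'subSuite': None}, not a value of the declared dict[str,str] type).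
def Pre_get_allurePath (case : List (String × List (List (String × String)))) : Prop :=
  ((PySem.Dict.mk case).get? "labels").isSome = true ∧
  ∀ i ∈ ((PySem.Dict.mk case).get? "labels").getD [],
    (PySem.Dict.mk i).get? "name" = some "subSuite" → ((PySem.Dict.mk i).get? "value").isSome = true
instance (case : List (String × List (List (String × String)))) : Decidable (Pre_get_allurePath case) := by unfold Pre_get_allurePath; infer_instance

def pvWitness_get_allurePath : (List (String × List (List (String × String)))) :=
  [("labels", [[("name", "epic"), ("value", "E")], [("name", "subSuite"), ("value", "S")]])]

def Spec_get_allurePath (case : List (String × List (List (String × String)))) (out : List (Option String) × (List (String × String))) : Prop := out = get_allurePath_alt case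
instance (case : List (String × List (List (String × String)))) (out : List (Option String) × (List (String × String))) : Decidable (Spec_get_allurePath case out) := by unfold Spec_get_allurePath; infer_instance

-- ===== CLAIM (what is proved, stated in full; the proofs are below) =====
def Claim_equal_get_allurePath : Prop := ∀ (case : List (String × List (List (String × String)))), Dom_get_allurePath case → Pre_get_allurePath case → Spec_get_allurePath case (get_allurePath case)

-- ===== LEMMAS AND PROOFS =====

lemma stepA_epic (st : Option String × Option String × Option String × PySem.Dict String String)
    (i : List (String × String)) :
    (get_allurePathStepA st i).1 =
      if (PySem.Dict.mk i).get? "name" = some "epic" then (PySem.Dict.mk i).get? "value" else st.1 := by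
  unfold get_allurePathStepA
  split_ifs <;> (try rfl) <;> (cases hv : (PySem.Dict.mk i).get? "value" <;> simp [hv])

lemma stepA_feature (st : Option String × Option String × Option String × PySem.Dict String String)
    (i : List (String × String)) :
    (get_allurePathStepA st i).2.1 =
      if (PySem.Dict.mk i).get? "name" = some "feature" then (PySem.Dict.mk i).get? "value" else st.2.1 := by
  unfold get_allurePathStepA
  split_ifs <;> (try rfl) <;> (try (cases hv : (PySem.Dict.mk i).get? "value" <;> simp [hv])) <;> simp_all

lemma stepA_story (st : Option String × Option String × Option String × PySem.Dict String String)
    (i : List (String × String)) :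
    (get_allurePathStepA st i).2.2.1 =
      if (PySem.Dict.mk i).get? "name" = some "story" then (PySem.Dict.mk i).get? "value" else st.2.2.1 := by
  unfold get_allurePathStepA
  split_ifs <;> (try rfl) <;> (try (cases hv : (PySem.Dict.mk i).get? "value" <;> simp [hv])) <;> simp_all

lemma stepA_dir (st : Option String × Option String × Option String × PySem.Dict String String)
    (i : List (String × String)) :
    (get_allurePathStepA st i).2.2.2 =
      if (PySem.Dict.mk i).get? "name" = some "subSuite" then
        (match (PySem.Dict.mk i).get? "value" with
         | some v => st.2.2.2.insert "subSuite" v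
         | none => st.2.2.2)
      else st.2.2.2 := by
  unfold get_allurePathStepA
  split_ifs <;> (try rfl) <;> (try (cases hv : (PySem.Dict.mk i).get? "value" <;> simp [hv])) <;> simp_all

lemma lastLabel_append (xs ys : List (List (String × String))) (name : String) :
    lastLabel (xs ++ ys) name =
      if (lastLabel xs name).1 then lastLabel xs name else lastLabel ys name := by
  induction xs with
  | nil => simp [lastLabel]
  | cons i rest ih =>
    by_cases h : (PySem.Dict.mk i).get? "name" = some name
    · simp [lastLabel, h]
    · simp [lastLabel, h, ih]

lemma foldA_epic (labels : List (List (String × String))) :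
    ∀ st, (labels.foldl get_allurePathStepA st).1 =
      (if (lastLabel labels.reverse "epic").1 then (lastLabel labels.reverse "epic").2 else st.1) := by
  induction labels with
  | nil => intro st; simp [lastLabel]
  | cons i rest ih =>
    intro st
    simp only [List.foldl_cons, List.reverse_cons, lastLabel_append, ih]
    by_cases h : (PySem.Dict.mk i).get? "name" = some "epic" <;>
      by_cases hr : (lastLabel rest.reverse "epic").1 <;>
        simp [hr, lastLabel, h, stepA_epic]

lemma foldA_feature (labels : List (List (String × String))) :
    ∀ st, (labels.foldl get_allurePathStepA st).2.1 =
      (if (lastLabel labels.reverse "feature").1 then (lastLabel labels.reverse "feature").2 else st.2.1) := by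
  induction labels with
  | nil => intro st; simp [lastLabel]
  | cons i rest ih =>
    intro st
    simp only [List.foldl_cons, List.reverse_cons, lastLabel_append, ih]
    by_cases h : (PySem.Dict.mk i).get? "name" = some "feature" <;>
      by_cases hr : (lastLabel rest.reverse "feature").1 <;>
        simp [hr, lastLabel, h, stepA_feature]

lemma foldA_story (labels : List (List (String × String))) :
    ∀ st, (labels.foldl get_allurePathStepA st).2.2.1 =
      (if (lastLabel labels.reverse "story").1 then (lastLabel labels.reverse "story").2 else st.2.2.1) := by
  induction labels with
  | nil => intro st; simp [lastLabel]
  | cons i rest ih =>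
    intro st
    simp only [List.foldl_cons, List.reverse_cons, lastLabel_append, ih]
    by_cases h : (PySem.Dict.mk i).get? "name" = some "story" <;>
      by_cases hr : (lastLabel rest.reverse "story").1 <;>
        simp [hr, lastLabel, h, stepA_story]

lemma lastLabel_not_found (xs : List (List (String × String))) (name : String)
    (h : (lastLabel xs name).1 = false) : (lastLabel xs name).2 = none := by
  induction xs with
  | nil => rfl
  | cons i rest ih =>
    by_cases hn : (PySem.Dict.mk i).get? "name" = some name
    · simp [lastLabel, hn] at h
    · simp only [lastLabel, if_neg hn] at h ⊢
      exact ih h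

lemma lastLabel_if (xs : List (List (String × String))) (name : String) :
    (if (lastLabel xs name).1 then (lastLabel xs name).2 else none) = (lastLabel xs name).2 := by
  cases h : (lastLabel xs name).1 with
  | false => simp [lastLabel_not_found xs name h]
  | true => simp

lemma lastLabel_isSome (xs : List (List (String × String)))
    (h : ∀ i ∈ xs, (PySem.Dict.mk i).get? "name" = some "subSuite" →
          ((PySem.Dict.mk i).get? "value").isSome = true) :
    (lastLabel xs "subSuite").1 = true → ((lastLabel xs "subSuite").2).isSome = true := by
  induction xs with
  | nil => simp [lastLabel]
  | cons i rest ih =>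
    by_cases hn : (PySem.Dict.mk i).get? "name" = some "subSuite"
    · intro _
      simpa [lastLabel, hn] using h i (List.mem_cons_self ..) hn
    · simp only [lastLabel, if_neg hn]
      exact ih (fun j hj => h j (List.mem_cons_of_mem _ hj))

lemma foldA_dir (labels : List (List (String × String)))
    (h : ∀ i ∈ labels, (PySem.Dict.mk i).get? "name" = some "subSuite" →
          ((PySem.Dict.mk i).get? "value").isSome = true) :
    ∀ st, (labels.foldl get_allurePathStepA st).2.2.2 =
      (match lastLabel labels.reverse "subSuite" with
       | (true, some v) => st.2.2.2.insert "subSuite" v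
       | _ => st.2.2.2) := by
  induction labels with
  | nil => intro st; simp [lastLabel]
  | cons i rest ih =>
    intro st
    have hrest := fun j hj => h j (List.mem_cons_of_mem _ hj)
    have hi := h i (List.mem_cons_self ..)
    simp only [List.foldl_cons, List.reverse_cons, lastLabel_append, ih hrest]
    by_cases hn : (PySem.Dict.mk i).get? "name" = some "subSuite"
    · obtain ⟨v', hv'⟩ := Option.isSome_iff_exists.mp (hi hn)
      cases hr : lastLabel rest.reverse "subSuite" with
      | mk b w =>
        cases b with
        | false => simp [hr, lastLabel, hn, hv', stepA_dir]
        | true =>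
          have := lastLabel_isSome rest.reverse
            (fun j hj => hrest j (List.mem_reverse.mp hj)) (by rw [hr])
          rw [hr] at this
          obtain ⟨v, hv⟩ := Option.isSome_iff_exists.mp this
          subst hv
          simp [hr, lastLabel, hn, hv', stepA_dir, PySem.Dict.insert_insert_self]
    · cases hr : lastLabel rest.reverse "subSuite" with
      | mk b w =>
        cases b <;> cases w <;> simp [hr, lastLabel, hn, stepA_dir]

-- ===== VERDICT (by name: the statement is the Claim_ definition above) =====
theorem get_allurePath_spec : Claim_equal_get_allurePath := by
  intro case _ hpre
  obtain ⟨hlab, hsub⟩ := hpre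
  unfold Spec_get_allurePath get_allurePath get_allurePath_alt
  cases hcase : (PySem.Dict.mk case).get? "labels" with
  | none => exact absurd hlab (by simp [hcase])
  | some labels =>
    rw [hcase] at hsub
    simp only [Option.getD_some] at hsub
    simp only [foldA_epic, foldA_feature, foldA_story, foldA_dir labels hsub, lastLabel_if]
    have hsubr : (lastLabel labels.reverse "subSuite").1 = true →
        ((lastLabel labels.reverse "subSuite").2).isSome = true :=
      lastLabel_isSome labels.reverse (fun j hj => hsub j (List.mem_reverse.mp hj))
    cases hr : lastLabel labels.reverse "subSuite" with
    | mk b w =>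
      cases b with
      | false => simp [hr, PySem.Dict.items, PySem.Dict.empty]
      | true =>
        have := hsubr (by rw [hr])
        rw [hr] at this
        obtain ⟨v, hv⟩ := Option.isSome_iff_exists.mp this
        subst hv
        simp [hr, PySem.Dict.items, PySem.Dict.empty, PySem.Dict.insert]
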